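-- pv_equiv track=rewrite | github.com/ZunhaiSu/SGLang-FluentLLM | python/sglang/srt/layers/flashinfer_comm_fusion.py | get_num_tokens_per_rank
-- ===== SOURCE A (Python) =====
-- def get_num_tokens_per_rank(world_size: int, total_tokens_in_group: int) -> list:
--     token_list_in_group = []
--     for rank in range(0, world_size):
--         num_tokens_per_rank = total_tokens_in_group // world_size + (
--             1 if (rank < total_tokens_in_group % world_size) else 0
--         )
--         token_list_in_group.append(num_tokens_per_rank)
--     return token_list_in_group
-- ===== SOURCE B (Python) =====
-- def get_num_tokens_per_rank(world_size: int, total_tokens_in_group: int) -> list: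
--     # Peel one rank at a time: each rank takes the ceiling share of the tokens
--     # still remaining, divided by the number of ranks still to serve.
--     token_list_in_group = []
--     remaining = total_tokens_in_group
--     for ranks_left in range(world_size, 0, -1):
--         share = -((-remaining) // ranks_left)  # ceiling division
--         token_list_in_group.append(share)
--         remaining -= share
--     return token_list_in_group
-- ===== Notes on version B (the rewrite author's own statement) =====
-- stated objective: alternative
-- what changed: Replaces A's per-rank 'global quotient plus conditional extra' computation by a running-remainder loop in which each rank takes the ceiling share of the tokens still remaining over the ranks still to serve.
import Mathlib
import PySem

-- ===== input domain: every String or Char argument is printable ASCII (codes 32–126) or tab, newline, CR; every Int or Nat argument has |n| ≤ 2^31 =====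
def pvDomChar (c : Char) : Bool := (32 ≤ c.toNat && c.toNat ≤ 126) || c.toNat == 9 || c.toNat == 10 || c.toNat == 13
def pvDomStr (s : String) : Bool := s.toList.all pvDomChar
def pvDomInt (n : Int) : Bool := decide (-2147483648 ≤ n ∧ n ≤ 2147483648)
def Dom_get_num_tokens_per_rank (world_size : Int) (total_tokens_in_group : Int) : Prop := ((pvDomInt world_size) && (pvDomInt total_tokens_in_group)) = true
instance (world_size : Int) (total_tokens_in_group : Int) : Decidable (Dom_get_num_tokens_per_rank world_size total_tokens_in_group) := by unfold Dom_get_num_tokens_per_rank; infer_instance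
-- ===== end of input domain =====

-- B replaces A's per-rank "quotient + conditional extra" loop by a running-remainder
-- loop: each rank takes the ceiling share of the tokens still remaining over the
-- ranks still to serve (alternative decomposition; same cost). Both are total.

-- ===== PORT A =====
def get_num_tokens_per_rank (world_size : Int) (total_tokens_in_group : Int) : List Int :=
  (PySem.List.pyRange 0 world_size 1).foldl
    (fun token_list_in_group rank =>
      token_list_in_group ++
        [PySem.Int.floordiv total_tokens_in_group world_size +
          (if rank < PySem.Int.mod total_tokens_in_group world_size then 1 else 0)]) []

-- ===== PORT B =====
-- the for-loop of Source B: state = (remaining, accumulated list); one recursive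
-- step per iteration of `for ranks_left in range(world_size, 0, -1)`
def pvGoB (ranks_left : Int) (remaining : Int) (acc : List Int) : List Int :=
  if _h : ranks_left ≤ 0 then acc
  else
    let share := -(PySem.Int.floordiv (-remaining) ranks_left)
    pvGoB (ranks_left - 1) (remaining - share) (acc ++ [share])
termination_by ranks_left.toNat
decreasing_by omega

def get_num_tokens_per_rank_alt (world_size : Int) (total_tokens_in_group : Int) : List Int :=
  pvGoB world_size total_tokens_in_group []

-- ===== PRECONDITION & SPEC =====
def Spec_get_num_tokens_per_rank (world_size : Int) (total_tokens_in_group : Int) (out : List Int) : Prop := out = get_num_tokens_per_rank_alt world_size total_tokens_in_group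
instance (world_size : Int) (total_tokens_in_group : Int) (out : List Int) : Decidable (Spec_get_num_tokens_per_rank world_size total_tokens_in_group out) := by unfold Spec_get_num_tokens_per_rank; infer_instance

-- ===== CLAIM (what is proved, stated in full; the proofs are below) =====
def Claim_equal_get_num_tokens_per_rank : Prop := ∀ (world_size : Int) (total_tokens_in_group : Int), Dom_get_num_tokens_per_rank world_size total_tokens_in_group → Spec_get_num_tokens_per_rank world_size total_tokens_in_group (get_num_tokens_per_rank world_size total_tokens_in_group)

-- ===== LEMMAS AND PROOFS =====

-- the common closed form both programs compute (proof-only helper)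
def pvBlocks (n t : Int) : List Int :=
  List.replicate (PySem.Int.mod t n).toNat (PySem.Int.floordiv t n + 1) ++
  List.replicate (n - PySem.Int.mod t n).toNat (PySem.Int.floordiv t n)

theorem map_const_pyRange (a b c : Int) :
    (PySem.List.pyRange a b 1).map (fun _ => c) = List.replicate (b - a).toNat c := by
  rw [List.map_const', PySem.List.length_pyRange_one]

-- A equals the block form for positive world_size
theorem a_eq_blocks (n t : Int) (hpos : 0 < n) :
    get_num_tokens_per_rank n t = pvBlocks n t := by
  unfold get_num_tokens_per_rank pvBlocks
  rw [PySem.List.foldl_append_singleton_eq_map, List.nil_append]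
  set q := PySem.Int.floordiv t n with hq
  set r := PySem.Int.mod t n with hr
  have h0 : 0 ≤ r := PySem.Int.mod_nonneg t hpos
  have hlt : r < n := PySem.Int.mod_lt t hpos
  have e1 : (PySem.List.pyRange 0 r 1).map
      (fun rank => q + if rank < r then 1 else 0) = List.replicate r.toNat (q + 1) := by
    have : (PySem.List.pyRange 0 r 1).map
        (fun rank => q + if rank < r then 1 else 0)
        = (PySem.List.pyRange 0 r 1).map (fun _ => q + 1) :=
      List.map_congr_left (fun x hx => by
        have hm := (PySem.List.mem_pyRange_one).1 hx
        simp [if_pos hm.2])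
    rw [this, map_const_pyRange]
    norm_num
  have e2 : (PySem.List.pyRange r n 1).map
      (fun rank => q + if rank < r then 1 else 0)
        = List.replicate (n - r).toNat q := by
    have : (PySem.List.pyRange r n 1).map
        (fun rank => q + if rank < r then 1 else 0)
        = (PySem.List.pyRange r n 1).map (fun _ => q) :=
      List.map_congr_left (fun x hx => by
        have hm := (PySem.List.mem_pyRange_one).1 hx
        simp [if_neg (by omega : ¬ x < r)])
    rw [this, map_const_pyRange]
  rw [PySem.List.pyRange_one_append 0 r n h0 (le_of_lt hlt), List.map_append, e1, e2]

-- the ceiling share taken by one iteration of B's loop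
theorem share_eq (b t : Int) (hb : 0 < b) :
    -(PySem.Int.floordiv (-t) b)
      = PySem.Int.floordiv t b + (if 0 < PySem.Int.mod t b then 1 else 0) := by
  set q := PySem.Int.floordiv t b with hq
  set r := PySem.Int.mod t b with hr
  have h0 : 0 ≤ r := PySem.Int.mod_nonneg t hb
  have hlt : r < b := PySem.Int.mod_lt t hb
  have ht : q * b + r = t := PySem.Int.floordiv_mul_add_mod t b
  rw [PySem.Int.neg_floordiv_neg_eq_iff_of_pos hb]
  by_cases hrpos : 0 < r
  · rw [if_pos hrpos]
    constructor <;> nlinarith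
  · rw [if_neg hrpos]
    constructor <;> nlinarith

-- B's loop computes the block form (induction over the number of ranks)
theorem goB_blocks : ∀ (k : Nat) (t : Int) (acc : List Int),
    pvGoB (k : Int) t acc = acc ++ (if k = 0 then [] else pvBlocks (k : Int) t) := by
  intro k
  induction k with
  | zero => intro t acc; rw [pvGoB]; simp
  | succ m ih =>
    intro t acc
    rw [pvGoB]
    have hpos : (0 : Int) < ((m + 1 : Nat) : Int) := by push_cast; omega
    rw [dif_neg (by omega)]
    have hstep : ((m + 1 : Nat) : Int) - 1 = (m : Int) := by push_cast; ring
    simp only [hstep]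
    set b : Int := ((m + 1 : Nat) : Int) with hb
    set q := PySem.Int.floordiv t b with hq
    set r := PySem.Int.mod t b with hr
    have h0 : 0 ≤ r := PySem.Int.mod_nonneg t hpos
    have hlt : r < b := PySem.Int.mod_lt t hpos
    have ht : q * b + r = t := PySem.Int.floordiv_mul_add_mod t b
    have hbm : b = (m : Int) + 1 := by push_cast [hb]; ring
    have htm : q * (m : Int) + q + r = t := by rw [hbm] at ht; linear_combination ht
    have hshare : -(PySem.Int.floordiv (-t) b) = q + (if 0 < r then 1 else 0) :=
      share_eq b t hpos
    rw [hshare, ih, if_neg (by omega : ¬ m + 1 = 0), List.append_assoc]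
    congr 1
    by_cases hm : m = 0
    · -- last iteration: one rank left, it takes everything
      subst hm
      have hr0 : r = 0 := by omega
      have hqt : q = t := by rw [← ht, hr0]; simp [hb]
      simp [pvBlocks, hr0, hqt, hb]
    · -- m > 0 ranks remain after this one
      have hmpos : (0 : Int) < (m : Int) := by omega
      have hexp : (q + 1) * (m : Int) = q * (m : Int) + (m : Int) := by ring
      rw [if_neg hm]
      by_cases hrpos : 0 < r
      · rw [if_pos hrpos]
        have hq' : PySem.Int.floordiv (t - (q + 1)) (m : Int) = q := by
          rw [PySem.Int.floordiv_eq_iff_of_pos hmpos]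
          constructor <;> linarith [htm, hexp]
        have hr' : PySem.Int.mod (t - (q + 1)) (m : Int) = r - 1 := by
          have h2 := PySem.Int.floordiv_mul_add_mod (t - (q + 1)) (m : Int)
          rw [hq'] at h2
          linarith [htm]
        unfold pvBlocks
        rw [hq', hr', ← hq, ← hr]
        have hb' : (m : Int) - (r - 1) = b - r := by omega
        have hrt : r.toNat = (r - 1).toNat + 1 := by omega
        rw [hb', hrt, List.replicate_succ]
        simp
      · rw [if_neg hrpos, add_zero]
        have hr0 : r = 0 := by omega
        have hq' : PySem.Int.floordiv (t - q) (m : Int) = q := by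
          rw [PySem.Int.floordiv_eq_iff_of_pos hmpos]
          constructor <;> linarith [htm, hexp]
        have hr' : PySem.Int.mod (t - q) (m : Int) = 0 := by
          have h2 := PySem.Int.floordiv_mul_add_mod (t - q) (m : Int)
          rw [hq'] at h2
          linarith [htm]
        unfold pvBlocks
        rw [hq', hr', ← hq, ← hr, hr0]
        have h2' : (b - 0).toNat = ((m : Int) - 0).toNat + 1 := by omega
        rw [h2', List.replicate_succ]
        simp

theorem main_eq (n t : Int) :
    get_num_tokens_per_rank n t = get_num_tokens_per_rank_alt n t := by
  unfold get_num_tokens_per_rank_alt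
  rcases le_or_gt n 0 with hle | hpos
  · rw [pvGoB, dif_pos hle]
    unfold get_num_tokens_per_rank
    rw [PySem.List.pyRange_one_eq_nil hle]
    rfl
  · have hn : n = ((n.toNat : Nat) : Int) := by omega
    rw [a_eq_blocks n t hpos, hn, goB_blocks n.toNat t [],
        if_neg (by omega : ¬ n.toNat = 0)]
    simp

-- ===== VERDICT (by name: the statement is the Claim_ definition above) =====
theorem get_num_tokens_per_rank_spec : Claim_equal_get_num_tokens_per_rank := by
  intro n t _
  unfold Spec_get_num_tokens_per_rank
  exact main_eq n t
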